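-- pv_equiv track=rewrite | github.com/rwdlnk/python-svof | src/python_refactor/vof/decomp.py | _optimal_dims
-- ===== SOURCE A (Python) =====
-- from typing import Optional, Tuple
--
-- def _optimal_dims(nprocs: int, ibar: int, jbar: int) -> Tuple[int, int]:
--     """Choose Px x Py that minimizes total halo perimeter."""
--     best = None
--     best_cost = float('inf')
--     for px in range(1, nprocs + 1):
--         if nprocs % px != 0:
--             continue
--         py = nprocs // px
--         # Each subdomain is roughly (ibar/px) x (jbar/py)
--         # Halo perimeter ~ 2*(jbar/py)*px + 2*(ibar/px)*py = 2*jbar + 2*ibar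
--         # But communication volume is proportional to interface area:
--         #   x-interfaces: (py-1 internal + periodic) * (jbar/py) per rank ~ jbar*(px-1)/px...
--         # Simpler: minimize total halo cells = 2*jbar*px + 2*ibar*py (total across all interfaces)
--         cost = 2 * (jbar // py) * (px - 1) + 2 * (ibar // px) * (py - 1)
--         if cost < best_cost:
--             best_cost = cost
--             best = (px, py)
--     return best
-- ===== SOURCE B (Python) =====
-- from typing import Optional, Tuple
--
-- def _optimal_dims(nprocs: int, ibar: int, jbar: int) -> Tuple[int, int]:
--     """Choose Px x Py that minimizes total halo perimeter.
--
--     Enumerates divisors only up to sqrt(nprocs): each small divisor d yields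
--     its cofactor nprocs // d; the large cofactors, reversed, continue the
--     ascending order, so the first-minimum (strict <) scan matches a full
--     ascending scan over all divisors.
--     """
--     small = []
--     large = []
--     d = 1
--     while d * d <= nprocs:
--         if nprocs % d == 0:
--             small.append(d)
--             q = nprocs // d
--             if q != d:
--                 large.append(q)
--         d += 1
--     best = None
--     best_cost = None
--     for px in small + large[::-1]:
--         py = nprocs // px
--         cost = 2 * (jbar // py) * (px - 1) + 2 * (ibar // px) * (py - 1)
--         if best_cost is None or cost < best_cost:
--             best_cost = cost
--             best = (px, py)
--     return best
-- ===== Notes on version B (the rewrite author's own statement) =====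
-- stated objective: faster
-- what changed: B enumerates divisors only up to sqrt(nprocs), pairing each small divisor d with its cofactor nprocs//d and scanning small divisors then reversed cofactors (still ascending), instead of A's trial division over every px in 1..nprocs.
-- outside the precondition, e.g. on _optimal_dims(0, 4, 4): A returns None, B returns None
import Mathlib
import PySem

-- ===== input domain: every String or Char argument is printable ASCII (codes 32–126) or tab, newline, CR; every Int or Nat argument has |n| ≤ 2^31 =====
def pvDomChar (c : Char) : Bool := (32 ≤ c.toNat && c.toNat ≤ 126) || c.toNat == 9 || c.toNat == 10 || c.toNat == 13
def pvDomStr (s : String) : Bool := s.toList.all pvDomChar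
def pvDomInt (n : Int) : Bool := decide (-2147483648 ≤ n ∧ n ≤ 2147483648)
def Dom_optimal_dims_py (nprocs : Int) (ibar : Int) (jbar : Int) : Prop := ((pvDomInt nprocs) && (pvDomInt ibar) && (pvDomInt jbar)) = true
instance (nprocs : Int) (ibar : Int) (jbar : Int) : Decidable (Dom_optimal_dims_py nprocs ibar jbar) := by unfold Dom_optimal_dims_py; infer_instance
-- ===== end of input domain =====

-- B enumerates divisors only up to √nprocs (pairing each with its cofactor) instead of
-- A's trial division over all of 1..nprocs; equivalence of the RETURN value is proved on Pre_.

-- ===== PORT A =====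
-- one iteration of A's loop: skip non-divisors, else strict-< running minimum.
-- best_cost = float('inf') is represented by `none` (cost < inf is always true).
def pvStepA (nprocs ibar jbar : Int) (st : Option (Int × Int) × Option Int) (px : Int) :
    Option (Int × Int) × Option Int :=
  if PySem.Int.mod nprocs px ≠ 0 then st
  else
    let py := PySem.Int.floordiv nprocs px
    let cost := 2 * (PySem.Int.floordiv jbar py) * (px - 1) +
                2 * (PySem.Int.floordiv ibar px) * (py - 1)
    if (match st.2 with | none => true | some bc => decide (cost < bc)) then
      (some (px, py), some cost)
    else st

def optimal_dims_py (nprocs : Int) (ibar : Int) (jbar : Int) : Int × Int :=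
  let r := (PySem.List.pyRange 1 (nprocs + 1) 1).foldl (pvStepA nprocs ibar jbar) (none, none)
  -- Python returns `best = None` when the loop body never ran (nprocs ≤ 0): not a Tuple[int,int],
  -- outside Pre_; the port returns the dummy (0, 0) there.
  r.1.getD (0, 0)

-- ===== PORT B =====
-- B's while loop: d runs while d*d ≤ n, collecting small divisors and their cofactors n//d.
def pvCollect (n : Int) (d : Nat) (small large : List Int) : List Int × List Int :=
  if h : (d : Int) * d ≤ n then
    if PySem.Int.mod n d = 0 then
      let q := PySem.Int.floordiv n d
      pvCollect n (d + 1) (small ++ [(d : Int)]) (if q ≠ (d : Int) then large ++ [q] else large)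
    else pvCollect n (d + 1) small large
  else (small, large)
termination_by n.toNat + 1 - d
decreasing_by
  all_goals
    have h2 : ((d * d : Nat) : Int) ≤ n := by push_cast; linarith
    have h4 : d ≤ d * d := by
      rcases Nat.eq_zero_or_pos d with h0 | h0
      · simp [h0]
      · exact Nat.le_mul_of_pos_left d h0
    omega

-- one iteration of B's for-loop (same body as A's, without A's continue-guard;
-- best_cost = None is `none`).
def pvStepB (nprocs ibar jbar : Int) (st : Option (Int × Int) × Option Int) (px : Int) :
    Option (Int × Int) × Option Int :=
  let py := PySem.Int.floordiv nprocs px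
  let cost := 2 * (PySem.Int.floordiv jbar py) * (px - 1) +
              2 * (PySem.Int.floordiv ibar px) * (py - 1)
  if (match st.2 with | none => true | some bc => decide (cost < bc)) then
    (some (px, py), some cost)
  else st

def optimal_dims_py_alt (nprocs : Int) (ibar : Int) (jbar : Int) : Int × Int :=
  let sl := pvCollect nprocs 1 [] []
  let r := (sl.1 ++ sl.2.reverse).foldl (pvStepB nprocs ibar jbar) (none, none)
  -- `best = None` for nprocs ≤ 0, as in A: outside Pre_, dummy (0, 0).
  r.1.getD (0, 0)

-- ===== PRECONDITION & SPEC =====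
-- Pre_ excludes nprocs ≤ 0: there A's loop never runs and it returns None, which is not a
-- value of the declared Tuple[int, int] type (B does the same).
def Pre_optimal_dims_py (nprocs : Int) (ibar : Int) (jbar : Int) : Prop := 1 ≤ nprocs
instance (nprocs : Int) (ibar : Int) (jbar : Int) : Decidable (Pre_optimal_dims_py nprocs ibar jbar) := by unfold Pre_optimal_dims_py; infer_instance

def pvWitness_optimal_dims_py : Int × Int × Int := (6, 10, 8)

def Spec_optimal_dims_py (nprocs : Int) (ibar : Int) (jbar : Int) (out : Int × Int) : Prop := out = optimal_dims_py_alt nprocs ibar jbar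
instance (nprocs : Int) (ibar : Int) (jbar : Int) (out : Int × Int) : Decidable (Spec_optimal_dims_py nprocs ibar jbar out) := by unfold Spec_optimal_dims_py; infer_instance

-- ===== CLAIM (what is proved, stated in full; the proofs are below) =====
def Claim_equal_optimal_dims_py : Prop := ∀ (nprocs : Int) (ibar : Int) (jbar : Int), Dom_optimal_dims_py nprocs ibar jbar → Pre_optimal_dims_py nprocs ibar jbar → Spec_optimal_dims_py nprocs ibar jbar (optimal_dims_py nprocs ibar jbar)

-- ===== LEMMAS AND PROOFS =====

-- two strictly increasing integer lists with the same members are equal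
theorem pv_sorted_mem_eq {l1 l2 : List Int} (h1 : l1.Pairwise (· < ·))
    (h2 : l2.Pairwise (· < ·)) (h : ∀ x, x ∈ l1 ↔ x ∈ l2) : l1 = l2 :=
  ((List.perm_ext_iff_of_nodup h1.nodup h2.nodup).2 h).eq_of_pairwise
    (fun _ _ _ _ hab hba => le_antisymm hab hba) (h1.imp le_of_lt) (h2.imp le_of_lt)

-- A's fold with the continue-guard is B's fold over the divisor-filtered list
theorem pv_fold_filter (n i j : Int) (l : List Int) (st : Option (Int × Int) × Option Int) :
    l.foldl (pvStepA n i j) st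
      = (l.filter (fun px => PySem.Int.mod n px == 0)).foldl (pvStepB n i j) st := by
  induction l generalizing st with
  | nil => rfl
  | cons px t ih =>
    by_cases hm : PySem.Int.mod n px = 0
    · have hstep : pvStepA n i j st px = pvStepB n i j st px := by simp [pvStepA, pvStepB, hm]
      have hf : (px :: t).filter (fun px => PySem.Int.mod n px == 0)
          = px :: t.filter (fun px => PySem.Int.mod n px == 0) := by simp [List.filter_cons, hm]
      rw [List.foldl_cons, hstep, ih, hf, List.foldl_cons]
    · have hstep : pvStepA n i j st px = st := by simp [pvStepA, hm]
      have hf : (px :: t).filter (fun px => PySem.Int.mod n px == 0)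
          = t.filter (fun px => PySem.Int.mod n px == 0) := by simp [List.filter_cons, hm]
      rw [List.foldl_cons, hstep, ih, hf]

-- one-step unfoldings of pvCollect
theorem pvCollect_step_div (n : Int) (d : Nat) (small large : List Int)
    (h : (d : Int) * d ≤ n) (hm : PySem.Int.mod n d = 0) :
    pvCollect n d small large
      = pvCollect n (d + 1) (small ++ [(d : Int)])
          (if PySem.Int.floordiv n d ≠ (d : Int) then large ++ [PySem.Int.floordiv n d]
           else large) := by
  rw [pvCollect]; simp [h, hm]

theorem pvCollect_step_ndiv (n : Int) (d : Nat) (small large : List Int)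
    (h : (d : Int) * d ≤ n) (hm : ¬ PySem.Int.mod n d = 0) :
    pvCollect n d small large = pvCollect n (d + 1) small large := by
  rw [pvCollect]; simp [h, hm]

theorem pvCollect_step_stop (n : Int) (d : Nat) (small large : List Int)
    (h : ¬ (d : Int) * d ≤ n) :
    pvCollect n d small large = (small, large) := by
  rw [pvCollect]; simp [h]

-- accumulator lemma for pvCollect
theorem pvCollect_acc (n : Int) (d : Nat) (small large : List Int) :
    pvCollect n d small large
      = (small ++ (pvCollect n d [] []).1, large ++ (pvCollect n d [] []).2) := by
  by_cases h : (d : Int) * d ≤ n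
  · by_cases hm : PySem.Int.mod n d = 0
    · rw [pvCollect_step_div n d small large h hm, pvCollect_step_div n d [] [] h hm,
        pvCollect_acc n (d + 1) (small ++ [(d : Int)]),
        pvCollect_acc n (d + 1) ([] ++ [(d : Int)])]
      by_cases hq : PySem.Int.floordiv n d ≠ (d : Int) <;> simp [hq]
    · rw [pvCollect_step_ndiv n d small large h hm, pvCollect_step_ndiv n d [] [] h hm,
        pvCollect_acc n (d + 1) small large]
  · rw [pvCollect_step_stop n d small large h, pvCollect_step_stop n d [] [] h]
    simp
termination_by n.toNat + 1 - d
decreasing_by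
  all_goals
    have h2 : ((d * d : Nat) : Int) ≤ n := by push_cast; linarith
    have h4 : d ≤ d * d := by
      rcases Nat.eq_zero_or_pos d with h0 | h0
      · simp [h0]
      · exact Nat.le_mul_of_pos_left d h0
    omega

-- membership in the small-divisor list
theorem pv_mem_small (n : Int) (hn : 1 ≤ n) (d : Nat) (hd : 1 ≤ d) (x : Int) :
    x ∈ (pvCollect n d [] []).1
      ↔ ((d : Int) ≤ x ∧ x * x ≤ n ∧ PySem.Int.mod n x = 0) := by
  have hd' : (1 : Int) ≤ (d : Int) := by exact_mod_cast hd
  by_cases h : (d : Int) * d ≤ n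
  · have ih := pv_mem_small n hn (d + 1) (by omega) x
    by_cases hm : PySem.Int.mod n d = 0
    · rw [pvCollect_step_div n d [] [] h hm, pvCollect_acc]
      simp only [List.nil_append, List.singleton_append, List.mem_cons, ih]
      constructor
      · rintro (rfl | ⟨h1, h2, h3⟩)
        · exact ⟨le_refl _, h, hm⟩
        · exact ⟨by push_cast at h1 ⊢; omega, h2, h3⟩
      · rintro ⟨h1, h2, h3⟩
        by_cases hx : x = (d : Int)
        · exact Or.inl hx
        · exact Or.inr ⟨by push_cast; push_cast at h1 hx; omega, h2, h3⟩
    · rw [pvCollect_step_ndiv n d [] [] h hm, ih]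
      constructor
      · rintro ⟨h1, h2, h3⟩
        exact ⟨by push_cast at h1 ⊢; omega, h2, h3⟩
      · rintro ⟨h1, h2, h3⟩
        have hx : x ≠ (d : Int) := by rintro rfl; exact hm h3
        exact ⟨by push_cast; push_cast at h1 hx; omega, h2, h3⟩
  · rw [pvCollect_step_stop n d [] [] h]
    simp only [List.not_mem_nil, false_iff]
    rintro ⟨h1, h2, h3⟩
    nlinarith
termination_by n.toNat + 1 - d
decreasing_by
  all_goals
    have h2 : ((d * d : Nat) : Int) ≤ n := by push_cast; linarith
    have h4 : d ≤ d * d := by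
      rcases Nat.eq_zero_or_pos d with h0 | h0
      · simp [h0]
      · exact Nat.le_mul_of_pos_left d h0
    omega

-- membership in the cofactor list
theorem pv_mem_large (n : Int) (hn : 1 ≤ n) (d : Nat) (hd : 1 ≤ d) (x : Int) :
    x ∈ (pvCollect n d [] []).2
      ↔ (0 < x ∧ (d : Int) * x ≤ n ∧ n < x * x ∧ PySem.Int.mod n x = 0) := by
  have hd' : (1 : Int) ≤ (d : Int) := by exact_mod_cast hd
  by_cases h : (d : Int) * d ≤ n
  · have ih := pv_mem_large n hn (d + 1) (by omega) x
    push_cast at ih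
    by_cases hm : PySem.Int.mod n d = 0
    · have hdvd : (d : Int) ∣ n := (PySem.Int.mod_eq_zero_iff_dvd n (d : Int)).1 hm
      have hqe : PySem.Int.floordiv n d = n / (d : Int) :=
        PySem.Int.floordiv_eq_ediv_of_pos (by omega)
      have hqd : (d : Int) * (n / (d : Int)) = n := Int.mul_ediv_cancel' hdvd
      have hqpos : 0 < n / (d : Int) := by
        by_contra hq
        push_neg at hq
        nlinarith [hqd]
      rw [pvCollect_step_div n d [] [] h hm, pvCollect_acc]
      simp only [List.nil_append]
      constructor
      · intro hmem
        rcases List.mem_append.1 hmem with hmem | hmem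
        · -- x came from the possibly-empty [q]
          by_cases hne : PySem.Int.floordiv n d ≠ (d : Int)
          · rw [if_pos hne] at hmem
            simp only [List.mem_singleton] at hmem
            subst hmem
            rw [hqe] at hne ⊢
            refine ⟨hqpos, by omega, ?_, ?_⟩
            · have hdq : (d : Int) ≤ n / (d : Int) := by nlinarith
              have hdq' : (d : Int) < n / (d : Int) := lt_of_le_of_ne hdq (Ne.symm hne)
              nlinarith
            · rw [PySem.Int.mod_eq_zero_iff_dvd]
              exact ⟨(d : Int), by linarith [hqd]⟩
          · rw [if_neg hne] at hmem
            exact absurd hmem (List.not_mem_nil)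
        · obtain ⟨h1, h2, h3, h4⟩ := ih.1 hmem
          exact ⟨h1, by nlinarith, h3, h4⟩
      · rintro ⟨h1, h2, h3, h4⟩
        rw [List.mem_append]
        by_cases hnext : ((d : Int) + 1) * x ≤ n
        · exact Or.inr (ih.2 ⟨h1, by push_cast; linarith, h3, h4⟩)
        · left
          have hxd : (x : Int) ∣ n := (PySem.Int.mod_eq_zero_iff_dvd n x).1 h4
          obtain ⟨m, hmn⟩ := hxd
          have hmd : m = (d : Int) := by nlinarith
          have hnx : n = (d : Int) * x := by rw [hmn, hmd]; ring
          have hx : n / (d : Int) = x := by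
            rw [hnx, Int.mul_ediv_cancel_left x (by omega)]
          have hne : PySem.Int.floordiv n d ≠ (d : Int) := by
            rw [hqe, hx]; rintro rfl; nlinarith
          rw [if_pos hne, hqe, hx]
          exact List.mem_singleton.2 rfl
    · rw [pvCollect_step_ndiv n d [] [] h hm, ih]
      constructor
      · rintro ⟨h1, h2, h3, h4⟩
        exact ⟨h1, by nlinarith, h3, h4⟩
      · rintro ⟨h1, h2, h3, h4⟩
        refine ⟨h1, ?_, h3, h4⟩
        by_contra hnext
        push_neg at hnext
        push_cast at h2
        have hxd : (x : Int) ∣ n := (PySem.Int.mod_eq_zero_iff_dvd n x).1 h4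
        obtain ⟨m, hmn⟩ := hxd
        have hmd : m = (d : Int) := by nlinarith
        have : (d : Int) ∣ n := ⟨x, by rw [hmn, hmd]; ring⟩
        exact hm ((PySem.Int.mod_eq_zero_iff_dvd n (d : Int)).2 this)
  · rw [pvCollect_step_stop n d [] [] h]
    simp only [List.not_mem_nil, false_iff]
    rintro ⟨h1, h2, h3, h4⟩
    push_neg at h
    nlinarith
termination_by n.toNat + 1 - d
decreasing_by
  all_goals
    have h2 : ((d * d : Nat) : Int) ≤ n := by push_cast; linarith
    have h4 : d ≤ d * d := by
      rcases Nat.eq_zero_or_pos d with h0 | h0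
      · simp [h0]
      · exact Nat.le_mul_of_pos_left d h0
    omega

-- the small-divisor list is strictly increasing
theorem pv_pairwise_small (n : Int) (hn : 1 ≤ n) (d : Nat) (hd : 1 ≤ d) :
    (pvCollect n d [] []).1.Pairwise (· < ·) := by
  by_cases h : (d : Int) * d ≤ n
  · have ih := pv_pairwise_small n hn (d + 1) (by omega)
    by_cases hm : PySem.Int.mod n d = 0
    · rw [pvCollect_step_div n d [] [] h hm, pvCollect_acc]
      simp only [List.nil_append, List.singleton_append, List.pairwise_cons]
      refine ⟨fun y hy => ?_, ih⟩
      have := (pv_mem_small n hn (d + 1) (by omega) y).1 hy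
      push_cast at this ⊢
      omega
    · rw [pvCollect_step_ndiv n d [] [] h hm]
      exact ih
  · rw [pvCollect_step_stop n d [] [] h]
    simp
termination_by n.toNat + 1 - d
decreasing_by
  all_goals
    have h2 : ((d * d : Nat) : Int) ≤ n := by push_cast; linarith
    have h4 : d ≤ d * d := by
      rcases Nat.eq_zero_or_pos d with h0 | h0
      · simp [h0]
      · exact Nat.le_mul_of_pos_left d h0
    omega

-- the cofactor list is strictly decreasing
theorem pv_pairwise_large (n : Int) (hn : 1 ≤ n) (d : Nat) (hd : 1 ≤ d) :
    (pvCollect n d [] []).2.Pairwise (fun a b => b < a) := by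
  have hd' : (1 : Int) ≤ (d : Int) := by exact_mod_cast hd
  by_cases h : (d : Int) * d ≤ n
  · have ih := pv_pairwise_large n hn (d + 1) (by omega)
    by_cases hm : PySem.Int.mod n d = 0
    · have hdvd : (d : Int) ∣ n := (PySem.Int.mod_eq_zero_iff_dvd n (d : Int)).1 hm
      have hqe : PySem.Int.floordiv n d = n / (d : Int) :=
        PySem.Int.floordiv_eq_ediv_of_pos (by omega)
      have hqd : (d : Int) * (n / (d : Int)) = n := Int.mul_ediv_cancel' hdvd
      rw [pvCollect_step_div n d [] [] h hm, pvCollect_acc]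
      by_cases hne : PySem.Int.floordiv n d ≠ (d : Int)
      · rw [if_pos hne]
        simp only [List.nil_append, List.singleton_append, List.pairwise_cons]
        refine ⟨fun y hy => ?_, ih⟩
        have hmem := (pv_mem_large n hn (d + 1) (by omega) y).1 hy
        rw [hqe]
        have h1 := hmem.1
        have h2 := hmem.2.1
        push_cast at h2
        nlinarith
      · rw [if_neg hne]
        simpa using ih
    · rw [pvCollect_step_ndiv n d [] [] h hm]
      exact ih
  · rw [pvCollect_step_stop n d [] [] h]
    simp
termination_by n.toNat + 1 - d
decreasing_by
  all_goals
    have h2 : ((d * d : Nat) : Int) ≤ n := by push_cast; linarith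
    have h4 : d ≤ d * d := by
      rcases Nat.eq_zero_or_pos d with h0 | h0
      · simp [h0]
      · exact Nat.le_mul_of_pos_left d h0
    omega

-- the filtered ascending range 1..n equals small divisors ++ reversed cofactors
theorem pv_divisors_eq (n : Int) (hn : 1 ≤ n) :
    (PySem.List.pyRange 1 (n + 1) 1).filter (fun px => PySem.Int.mod n px == 0)
      = (pvCollect n 1 [] []).1 ++ (pvCollect n 1 [] []).2.reverse := by
  apply pv_sorted_mem_eq
  · exact (PySem.List.pairwise_lt_pyRange_one 1 (n + 1)).filter _
  · rw [List.pairwise_append]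
    refine ⟨pv_pairwise_small n hn 1 le_rfl, ?_, ?_⟩
    · rw [List.pairwise_reverse]
      exact pv_pairwise_large n hn 1 le_rfl
    · intro x hx y hy
      have hxs := (pv_mem_small n hn 1 le_rfl x).1 hx
      have hys := (pv_mem_large n hn 1 le_rfl y).1 (List.mem_reverse.1 hy)
      nlinarith [hxs.1, hxs.2.1, hys.1, hys.2.2.1]
  · intro x
    rw [List.mem_filter, PySem.List.mem_pyRange_one, List.mem_append, List.mem_reverse,
        pv_mem_small n hn 1 le_rfl, pv_mem_large n hn 1 le_rfl]
    simp only [beq_iff_eq, Nat.cast_one]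
    constructor
    · rintro ⟨⟨h1, h2⟩, h3⟩
      by_cases hs : x * x ≤ n
      · exact Or.inl ⟨h1, hs, h3⟩
      · exact Or.inr ⟨by omega, by omega, by omega, h3⟩
    · rintro (⟨h1, h2, h3⟩ | ⟨h1, h2, h3, h4⟩)
      · exact ⟨⟨h1, by nlinarith⟩, h3⟩
      · exact ⟨⟨by omega, by omega⟩, h4⟩

-- ===== VERDICT (by name: the statement is the Claim_ definition above) =====
theorem optimal_dims_py_spec : Claim_equal_optimal_dims_py := by
  intro nprocs ibar jbar _ hpre
  unfold Spec_optimal_dims_py optimal_dims_py optimal_dims_py_alt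
  rw [pv_fold_filter, pv_divisors_eq nprocs hpre]
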